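-- pv_equiv track=rewrite | github.com/OrangeInSouth/relationExtraction | REtest/REweb/relation_triple_extraction_RULE.py | complete_e
-- ===== SOURCE A (Python) =====
-- def complete_e(words, postags, child_dict_list, word_index, my_list):
--     """
--     完善识别的部分实体
--     """
--     # 美国，总统，奥巴马 word_index对应总统
--     # 台湾 属于 中国 word_index对应台湾与中国
--     my_list.append(word_index)
--     child_dict = child_dict_list[word_index]
--     prefix = ''
--     if 'ATT' in child_dict:
--         for i in range(len(child_dict['ATT'])):
--             prefix += complete_e(words, postags, child_dict_list, child_dict['ATT'][i], my_list)
--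
--             # todo
--             # 中国驻俄罗斯大使，想办法改一改
--     postfix = ''
--     if postags[word_index] == 'v':
--         if 'VOB' in child_dict:
--             postfix += complete_e(words, postags, child_dict_list, child_dict['VOB'][0], my_list)
--         if 'SBV' in child_dict:
--             prefix = complete_e(words, postags, child_dict_list, child_dict['SBV'][0], my_list) + prefix
--
--     return prefix + words[word_index] + postfix
-- ===== SOURCE B (Python) =====
-- def complete_e(words, postags, child_dict_list, word_index, my_list):
--     """
--     Iterative (explicit-stack) re-implementation: pass 1 reproduces A's my_list
--     appends (pre-order, children in ATT..., VOB, SBV order); pass 2 assembles the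
--     string with a stack of (emit, index) items in output order
--     (SBV-part, ATT-parts, the word itself, VOB-part) and joins the fragments.
--     """
--     # pass 1: my_list gets each node at the moment A's recursion would enter it
--     stack = [word_index]
--     while stack:
--         i = stack.pop()
--         my_list.append(i)
--         d = child_dict_list[i]
--         kids = list(d.get('ATT', []))
--         if postags[i] == 'v':
--             if 'VOB' in d:
--                 kids.append(d['VOB'][0])
--             if 'SBV' in d:
--                 kids.append(d['SBV'][0])
--         stack.extend(reversed(kids))
--     # pass 2: build the fragments in output order
--     out = []
--     stack = [(False, word_index)]
--     while stack:
--         emit, i = stack.pop()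
--         if emit:
--             out.append(words[i])
--             continue
--         d = child_dict_list[i]
--         items = []
--         if postags[i] == 'v' and 'SBV' in d:
--             items.append((False, d['SBV'][0]))
--         for j in d.get('ATT', []):
--             items.append((False, j))
--         items.append((True, i))
--         if postags[i] == 'v' and 'VOB' in d:
--             items.append((False, d['VOB'][0]))
--         stack.extend(reversed(items))
--     return ''.join(out)
-- ===== Notes on version B (the rewrite author's own statement) =====
-- stated objective: alternative
-- what changed: Replaces the self-recursive tree walk by an explicit-stack iterative traversal: a stack of (emit, index) items pushed in output order assembles the fragments bottom-up and joins them once, instead of building the string through nested recursive calls (a separate pre-order stack pass reproduces the my_list appends).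
import Mathlib
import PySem

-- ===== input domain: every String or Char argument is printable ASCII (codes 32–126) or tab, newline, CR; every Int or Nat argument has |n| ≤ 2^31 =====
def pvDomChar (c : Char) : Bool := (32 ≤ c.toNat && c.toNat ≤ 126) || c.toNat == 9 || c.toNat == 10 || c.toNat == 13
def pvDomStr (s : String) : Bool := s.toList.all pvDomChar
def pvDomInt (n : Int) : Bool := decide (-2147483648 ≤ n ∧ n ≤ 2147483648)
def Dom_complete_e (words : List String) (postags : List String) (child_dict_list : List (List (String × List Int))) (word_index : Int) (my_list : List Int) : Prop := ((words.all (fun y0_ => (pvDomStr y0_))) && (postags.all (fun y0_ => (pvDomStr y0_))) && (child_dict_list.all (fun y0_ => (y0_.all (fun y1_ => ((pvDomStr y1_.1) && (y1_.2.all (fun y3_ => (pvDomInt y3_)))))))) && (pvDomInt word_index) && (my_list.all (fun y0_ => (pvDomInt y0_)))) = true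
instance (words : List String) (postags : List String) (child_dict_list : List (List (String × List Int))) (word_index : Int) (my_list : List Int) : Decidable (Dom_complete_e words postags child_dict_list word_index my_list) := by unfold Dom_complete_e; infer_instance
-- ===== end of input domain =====

set_option maxHeartbeats 1000000


-- B re-implements the recursive entity-string builder as an explicit-stack iterative
-- traversal (different decomposition, same return value); A and B both mutate my_list
-- in place in Python (the same appends) — that side effect is outside the Lean
-- signature, the equivalence proved here is about the RETURN value.

-- fuel bound shared by both ports: any recursion/stack depth is bounded by the number
-- of distinct reachable node indices, all of which are word_index, 0, or one of the
-- integers stored in child_dict_list.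
def intsOf (c : List (List (String × List Int))) : List Int :=
  c.flatMap (fun d => d.flatMap (fun kv => kv.2))

def fuelA (c : List (List (String × List Int))) : Nat := (intsOf c).length + 2

-- ===== PORT A =====
-- Literal port of A's recursion; the pair threads Python's my_list (appended on each
-- entry), the Nat fuel only makes the recursion total (inside Pre_ the exported fuel
-- fuelA child_dict_list is never exhausted).
def goA (w p : List String) (c : List (List (String × List Int))) : Nat → Int → List Int → List Int × String
  | 0, _, ml => (ml, "")
  | fuel+1, wi, ml =>
    let ml1 := ml ++ [wi]
    let d := (PySem.List.pyGet? c wi).getD []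
    -- prefix = ''; if 'ATT' in child_dict: for i in range(...): prefix += complete_e(…)
    let s1 : List Int × String :=
      match d.lookup "ATT" with
      | some att =>
        att.foldl (fun acc j =>
          let r := goA w p c fuel j acc.1
          (r.1, acc.2 ++ r.2)) (ml1, "")
      | none => (ml1, "")
    -- postfix = ''; if postags[word_index] == 'v': …
    if (PySem.List.pyGet? p wi).getD "" == "v" then
      let s2 : List Int × String :=
        match d.lookup "VOB" with
        | some l =>
          let r := goA w p c fuel ((PySem.List.pyGet? l 0).getD 0) s1.1
          (r.1, "" ++ r.2)
        | none => (s1.1, "")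
      let s3 : List Int × String :=
        match d.lookup "SBV" with
        | some l =>
          let r := goA w p c fuel ((PySem.List.pyGet? l 0).getD 0) s2.1
          (r.1, r.2 ++ s1.2)
        | none => (s2.1, s1.2)
      (s3.1, s3.2 ++ (PySem.List.pyGet? w wi).getD "" ++ s2.2)
    else
      (s1.1, s1.2 ++ (PySem.List.pyGet? w wi).getD "" ++ "")

def complete_e (words : List String) (postags : List String) (child_dict_list : List (List (String × List Int))) (word_index : Int) (my_list : List Int) : String :=
  (goA words postags child_dict_list (fuelA child_dict_list) word_index my_list).2

-- ===== PORT B =====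
-- Source B pass 1: the children in the order A's recursion enters them (ATT…, VOB, SBV).
-- ('d[k][0]' with an empty list under 'VOB'/'SBV' raises IndexError in Python and is
-- outside Pre_; the port takes the junk default 0 there.)
-- kids0 is also reused below by Pre_'s reachability/acyclicity condition.
def kids0 (p : List String) (c : List (List (String × List Int))) (i : Int) : List Int :=
  let d := (PySem.List.pyGet? c i).getD []
  let att := (d.lookup "ATT").getD []
  let verb := (PySem.List.pyGet? p i).getD "" == "v"
  let vob : List Int := if verb then
      match d.lookup "VOB" with
      | some l => [(PySem.List.pyGet? l 0).getD 0]
      | none => [] else []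
  let sbv : List Int := if verb then
      match d.lookup "SBV" with
      | some l => [(PySem.List.pyGet? l 0).getD 0]
      | none => [] else []
  att ++ vob ++ sbv

-- Source B pass 2: the (emit, index) items one visit pushes, in output order.
def itemsB (p : List String) (c : List (List (String × List Int))) (i : Int) : List (Bool × Int) :=
  let d := (PySem.List.pyGet? c i).getD []
  let verb := (PySem.List.pyGet? p i).getD "" == "v"
  let sbv : List (Bool × Int) := if verb then
      match d.lookup "SBV" with
      | some l => [(false, (PySem.List.pyGet? l 0).getD 0)]
      | none => [] else []
  let att : List (Bool × Int) := ((d.lookup "ATT").getD []).map (fun j => (false, j))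
  let vob : List (Bool × Int) := if verb then
      match d.lookup "VOB" with
      | some l => [(false, (PySem.List.pyGet? l 0).getD 0)]
      | none => [] else []
  sbv ++ att ++ [(true, i)] ++ vob

-- Source B pass 1 loop (my_list mutation; its result cannot be returned under the signature)
def visitLoopB (p : List String) (c : List (List (String × List Int))) : Nat → List Int → List Int → List Int
  | _, [], ml => ml
  | 0, _ :: _, ml => ml
  | f+1, i :: st, ml => visitLoopB p c f (kids0 p c i ++ st) (ml ++ [i])

-- fuel bound for the two while-loops (2 stack pops per visited subtree node)
def costF (p : List String) (c : List (List (String × List Int))) : Nat → Int → Nat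
  | 0, _ => 0
  | f+1, i => 2 + ((kids0 p c i).map (costF p c f)).sum

-- Source B pass 2 loop (head of the Lean list = top of the Python stack)
def runB (w p : List String) (c : List (List (String × List Int))) : Nat → List (Bool × Int) → List String → List String
  | _, [], out => out
  | 0, _ :: _, out => out
  | f+1, (true, i) :: st, out => runB w p c f st (out ++ [(PySem.List.pyGet? w i).getD ""])
  | f+1, (false, i) :: st, out => runB w p c f (itemsB p c i ++ st) out

def complete_e_alt (words : List String) (postags : List String) (child_dict_list : List (List (String × List Int))) (word_index : Int) (my_list : List Int) : String :=
  let fuel := costF postags child_dict_list (fuelA child_dict_list + 1) word_index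
  let _ml := visitLoopB postags child_dict_list fuel [word_index] my_list
  PySem.Str.join "" (runB words postags child_dict_list fuel [(false, word_index)] [])

-- ===== PRECONDITION & SPEC =====
def stepF (p : List String) (c : List (List (String × List Int))) (S : Finset Int) : Finset Int :=
  S ∪ S.biUnion (fun j => (kids0 p c j).toFinset)

-- CF p c f i: the node indices reachable from i along child edges in ≤ f steps
-- (at f = fuelA c it is the full reachable set, see CF_stab below)
def CF (p : List String) (c : List (List (String × List Int))) : Nat → Int → Finset Int
  | 0, i => {i}
  | f+1, i => stepF p c (CF p c f i)

-- a visited node must not raise: its index is valid (Python wraparound included) for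
-- all three lists, and a verb node's VOB/SBV entry, if present, is non-empty
def goodNodeB (w p : List String) (c : List (List (String × List Int))) (i : Int) : Bool :=
  let d := (PySem.List.pyGet? c i).getD []
  decide (PySem.Raise.InRange w.length i) && decide (PySem.Raise.InRange p.length i)
    && decide (PySem.Raise.InRange c.length i)
    && (!((PySem.List.pyGet? p i).getD "" == "v")
        || ((match d.lookup "VOB" with | some [] => false | _ => true)
            && (match d.lookup "SBV" with | some [] => false | _ => true)))

-- Pre_ says exactly that A's recursion returns: every node reachable from word_index
-- (the nodes A visits, negative Python indices wrap) has valid indices and no empty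
-- VOB/SBV entry at a verb, and the reachable child graph is acyclic (a reachable cycle
-- is a RecursionError, an invalid index an IndexError in Python).
def Pre_complete_e (words : List String) (postags : List String) (child_dict_list : List (List (String × List Int))) (word_index : Int) (my_list : List Int) : Prop :=
  (∀ i ∈ CF postags child_dict_list (fuelA child_dict_list) word_index,
    goodNodeB words postags child_dict_list i = true)
  ∧ (∀ i ∈ CF postags child_dict_list (fuelA child_dict_list) word_index,
      ∀ j ∈ kids0 postags child_dict_list i,
        i ∉ CF postags child_dict_list (fuelA child_dict_list) j)

instance (words : List String) (postags : List String) (child_dict_list : List (List (String × List Int))) (word_index : Int) (my_list : List Int) : Decidable (Pre_complete_e words postags child_dict_list word_index my_list) := by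
  unfold Pre_complete_e; infer_instance

def pvWitness_complete_e : List String × List String × (List (List (String × List Int))) × Int × List Int :=
  (["Alice", " likes ", "Bob"], ["n", "v", "n"], [[], [("SBV", [0]), ("VOB", [2])], []], 1, [7])

def Spec_complete_e (words : List String) (postags : List String) (child_dict_list : List (List (String × List Int))) (word_index : Int) (my_list : List Int) (out : String) : Prop := out = complete_e_alt words postags child_dict_list word_index my_list
instance (words : List String) (postags : List String) (child_dict_list : List (List (String × List Int))) (word_index : Int) (my_list : List Int) (out : String) : Decidable (Spec_complete_e words postags child_dict_list word_index my_list out) := by unfold Spec_complete_e; infer_instance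

-- ===== CLAIM (what is proved, stated in full; the proofs are below) =====
def Claim_equal_complete_e : Prop := ∀ (words : List String) (postags : List String) (child_dict_list : List (List (String × List Int))) (word_index : Int) (my_list : List Int), Dom_complete_e words postags child_dict_list word_index my_list → Pre_complete_e words postags child_dict_list word_index my_list → Spec_complete_e words postags child_dict_list word_index my_list (complete_e words postags child_dict_list word_index my_list)

-- ===== LEMMAS AND PROOFS =====

-- accessor decompositions
def attOf (c : List (List (String × List Int))) (i : Int) : List Int :=
  ((((PySem.List.pyGet? c i).getD []).lookup "ATT").getD [])

def vobOf (p : List String) (c : List (List (String × List Int))) (i : Int) : List Int :=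
  if (PySem.List.pyGet? p i).getD "" == "v" then
    match ((PySem.List.pyGet? c i).getD []).lookup "VOB" with
    | some l => [(PySem.List.pyGet? l 0).getD 0]
    | none => []
  else []

def sbvOf (p : List String) (c : List (List (String × List Int))) (i : Int) : List Int :=
  if (PySem.List.pyGet? p i).getD "" == "v" then
    match ((PySem.List.pyGet? c i).getD []).lookup "SBV" with
    | some l => [(PySem.List.pyGet? l 0).getD 0]
    | none => []
  else []

theorem kids0_eq (p : List String) (c : List (List (String × List Int))) (i : Int) :
    kids0 p c i = attOf c i ++ vobOf p c i ++ sbvOf p c i := by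
  simp only [kids0, attOf, vobOf, sbvOf]

theorem itemsB_eq (p : List String) (c : List (List (String × List Int))) (i : Int) :
    itemsB p c i = (sbvOf p c i ++ attOf c i).map (fun j => ((false, j) : Bool × Int))
      ++ [(true, i)] ++ (vobOf p c i).map (fun j => ((false, j) : Bool × Int)) := by
  simp only [itemsB, attOf, vobOf, sbvOf, List.map_append]
  by_cases hv : ((PySem.List.pyGet? p i).getD "" == "v") = true
  · simp only [hv, if_true]
    rcases (((PySem.List.pyGet? c i).getD []).lookup "SBV") with _ | ls <;>
      rcases (((PySem.List.pyGet? c i).getD []).lookup "VOB") with _ | lv <;> simp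
  · simp only [hv, if_false]
    simp

-- string concatenation of a fragment list
def joinAll : List String → String
  | [] => ""
  | s :: rest => s ++ joinAll rest

theorem joinAll_append (a b : List String) : joinAll (a ++ b) = joinAll a ++ joinAll b := by
  induction a with
  | nil => simp [joinAll]
  | cons x xs ih => simp [joinAll, ih, String.append_assoc]

theorem strJoin_eq (l : List String) : PySem.Str.join "" l = joinAll l := by
  induction l with
  | nil => rfl
  | cons x xs ih =>
    cases xs with
    | nil => simp [PySem.Str.join, PySem.Chars.join_singleton, joinAll]
    | cons y ys =>
      rw [show joinAll (x :: y :: ys) = x ++ joinAll (y :: ys) from rfl, ← ih]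
      simp [PySem.Str.join, PySem.Chars.join_cons_cons]

-- ===== graph machinery (CF = bounded reachability closure) =====
theorem subset_stepF (p : List String) (c : List (List (String × List Int))) (S : Finset Int) :
    S ⊆ stepF p c S := Finset.subset_union_left

theorem CF_mono_succ (p : List String) (c : List (List (String × List Int))) (f : Nat) (i : Int) :
    CF p c f i ⊆ CF p c (f+1) i := subset_stepF p c _

theorem CF_mono (p : List String) (c : List (List (String × List Int))) {f g : Nat} (h : f ≤ g) (i : Int) :
    CF p c f i ⊆ CF p c g i := by
  induction g with
  | zero => simp_all
  | succ g ih =>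
    rcases Nat.eq_or_lt_of_le h with rfl | h2
    · exact subset_rfl
    · exact (ih (Nat.lt_succ_iff.mp h2)).trans (CF_mono_succ p c g i)

theorem mem_CF_self (p : List String) (c : List (List (String × List Int))) (f : Nat) (i : Int) :
    i ∈ CF p c f i := by
  induction f with
  | zero => simp [CF]
  | succ f ih => exact subset_stepF p c _ ih

theorem kids_mem_CF (p : List String) (c : List (List (String × List Int))) (f : Nat) {i j : Int}
    (h : j ∈ kids0 p c i) : j ∈ CF p c (f+1) i := by
  apply Finset.mem_union_right
  exact Finset.mem_biUnion.mpr ⟨i, mem_CF_self p c f i, List.mem_toFinset.mpr h⟩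

theorem CF_stable_of_eq (p : List String) (c : List (List (String × List Int))) {f : Nat} {i : Int}
    (h : CF p c (f+1) i = CF p c f i) (e : Nat) : CF p c (f+e) i = CF p c f i := by
  induction e with
  | zero => rfl
  | succ e ih =>
    have h2 : CF p c (f+(e+1)) i = stepF p c (CF p c (f+e) i) := rfl
    rw [h2, ih]
    exact h

theorem lookup_mem_snd {α : Type} (k : String) :
    ∀ (l : List (String × α)) (v : α), l.lookup k = some v → ∃ kv ∈ l, kv.2 = v := by
  intro l
  induction l with
  | nil => intro v h; simp [List.lookup] at h
  | cons x xs ih =>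
    intro v h
    rcases x with ⟨k0, v0⟩
    by_cases h0 : (k == k0) = true
    · rw [List.lookup, h0] at h
      exact ⟨(k0, v0), by simp, by simpa using h⟩
    · rw [List.lookup, Bool.eq_false_iff.mpr h0] at h
      obtain ⟨kv, hkv, hv⟩ := ih v h
      exact ⟨kv, by simp [hkv], hv⟩

theorem kids0_subsetU (p : List String) (c : List (List (String × List Int))) (i : Int) :
    ∀ j ∈ kids0 p c i, j ∈ intsOf c ∨ j = 0 := by
  have hmem : ∀ (key : String) (l : List Int),
      ((PySem.List.pyGet? c i).getD []).lookup key = some l → ∀ x ∈ l, x ∈ intsOf c := by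
    intro key l hl x hx
    rcases hd : PySem.List.pyGet? c i with _ | d0
    · rw [hd] at hl; simp [List.lookup] at hl
    · rw [hd] at hl
      have hdc : d0 ∈ c := by
        first
        | exact PySem.List.mem_of_pyGet?_eq_some hd
        | exact PySem.List.mem_of_pyGet?_eq_some _ hd
        | exact PySem.List.mem_of_pyGet?_eq_some c hd
        | exact PySem.List.mem_of_pyGet?_eq_some c i hd
      obtain ⟨kv, hkv, hvv⟩ := lookup_mem_snd key d0 l hl
      simp only [intsOf, List.mem_flatMap]
      have hxkv : x ∈ kv.2 := by rw [hvv]; exact hx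
      exact ⟨d0, hdc, kv, hkv, hxkv⟩
  intro j hj
  rw [kids0_eq] at hj
  rcases List.mem_append.mp hj with hj' | hsbv
  · rcases List.mem_append.mp hj' with hatt | hvob
    · rw [attOf] at hatt
      rcases hA : (((PySem.List.pyGet? c i).getD []).lookup "ATT") with _ | l
      · rw [hA] at hatt; simp at hatt
      · rw [hA] at hatt
        exact Or.inl (hmem "ATT" l hA j hatt)
    · rw [vobOf] at hvob
      by_cases hv : ((PySem.List.pyGet? p i).getD "" == "v") = true
      · rw [if_pos hv] at hvob
        rcases hV : (((PySem.List.pyGet? c i).getD []).lookup "VOB") with _ | l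
        · rw [hV] at hvob; simp at hvob
        · rw [hV] at hvob
          rcases l with _ | ⟨x, t⟩
          · simp [PySem.List.pyGet?] at hvob
            exact Or.inr hvob
          · simp only [PySem.List.pyGet?_zero_cons, Option.getD_some, List.mem_singleton] at hvob
            exact Or.inl (hmem "VOB" (x :: t) hV j (by rw [hvob]; simp))
      · rw [if_neg hv] at hvob; cases hvob
  · rw [sbvOf] at hsbv
    by_cases hv : ((PySem.List.pyGet? p i).getD "" == "v") = true
    · rw [if_pos hv] at hsbv
      rcases hS : (((PySem.List.pyGet? c i).getD []).lookup "SBV") with _ | l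
      · rw [hS] at hsbv; simp at hsbv
      · rw [hS] at hsbv
        rcases l with _ | ⟨x, t⟩
        · simp [PySem.List.pyGet?] at hsbv
          exact Or.inr hsbv
        · simp only [PySem.List.pyGet?_zero_cons, Option.getD_some, List.mem_singleton] at hsbv
          exact Or.inl (hmem "SBV" (x :: t) hS j (by rw [hsbv]; simp))
    · rw [if_neg hv] at hsbv; cases hsbv

theorem CF_univ (p : List String) (c : List (List (String × List Int))) (f : Nat) (i : Int) :
    ∀ x ∈ CF p c f i, x = i ∨ x ∈ intsOf c ∨ x = 0 := by
  induction f with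
  | zero => intro x hx; simp [CF] at hx; exact Or.inl hx
  | succ f ih =>
    intro x hx
    rcases Finset.mem_union.mp hx with hx | hx
    · exact ih x hx
    · rcases Finset.mem_biUnion.mp hx with ⟨j, _, hxj⟩
      exact Or.inr (kids0_subsetU p c j x (List.mem_toFinset.mp hxj))

theorem CF_card_le (p : List String) (c : List (List (String × List Int))) (f : Nat) (i : Int) :
    (CF p c f i).card ≤ fuelA c := by
  have hsub : CF p c f i ⊆ insert i (insert 0 (intsOf c).toFinset) := by
    intro x hx
    rcases CF_univ p c f i x hx with rfl | hx | rfl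
    · simp
    · simp [List.mem_toFinset.mpr hx]
    · simp
  have h1 := Finset.card_le_card hsub
  have h2 := Finset.card_insert_le i (insert (0 : Int) (intsOf c).toFinset)
  have h3 := Finset.card_insert_le (0 : Int) (intsOf c).toFinset
  have h4 := (intsOf c).toFinset_card_le
  simp only [fuelA]
  omega

theorem CF_stab (p : List String) (c : List (List (String × List Int))) (i : Int) (e : Nat) :
    CF p c (fuelA c + e) i = CF p c (fuelA c) i := by
  suffices h : CF p c (fuelA c + 1) i = CF p c (fuelA c) i by exact CF_stable_of_eq p c h e
  by_contra hne
  have hstrict : ∀ k, k ≤ fuelA c → CF p c k i ⊂ CF p c (k+1) i := by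
    intro k hk
    rw [Finset.ssubset_iff_subset_ne]
    refine ⟨CF_mono_succ p c k i, ?_⟩
    intro heq
    have h1 : ∀ e', CF p c (k+e') i = CF p c k i := CF_stable_of_eq p c heq.symm
    have h2 : CF p c (fuelA c) i = CF p c k i := by
      have := h1 (fuelA c - k); rwa [Nat.add_sub_cancel' hk] at this
    have h3 : CF p c (fuelA c + 1) i = CF p c k i := by
      have := h1 (fuelA c + 1 - k)
      rwa [show k + (fuelA c + 1 - k) = fuelA c + 1 by omega] at this
    exact hne (h3.trans h2.symm)
  have hcard : ∀ k, k ≤ fuelA c → k + 1 ≤ (CF p c k i).card := by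
    intro k
    induction k with
    | zero => intro _; simp [CF]
    | succ k ih =>
      intro hk
      have h1 := ih (by omega)
      have h2 := Finset.card_lt_card (hstrict k (by omega))
      omega
  have h4 := hcard (fuelA c) le_rfl
  have h5 := CF_card_le p c (fuelA c) i
  omega

theorem CF_least (p : List String) (c : List (List (String × List Int))) {S : Finset Int}
    (hS : ∀ j ∈ S, ∀ x ∈ kids0 p c j, x ∈ S) {j : Int} (hj : j ∈ S) (f : Nat) :
    CF p c f j ⊆ S := by
  induction f with
  | zero => intro x hx; simp [CF] at hx; subst hx; exact hj
  | succ f ih =>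
    intro x hx
    rcases Finset.mem_union.mp hx with hx | hx
    · exact ih hx
    · rcases Finset.mem_biUnion.mp hx with ⟨j', hj', hxj⟩
      exact hS j' (ih hj') x (List.mem_toFinset.mp hxj)

theorem CF_closed (p : List String) (c : List (List (String × List Int))) {i : Int}
    {j : Int} (hj : j ∈ CF p c (fuelA c) i) : ∀ x ∈ kids0 p c j, x ∈ CF p c (fuelA c) i := by
  intro x hx
  have h1 : x ∈ CF p c (fuelA c + 1) i := by
    apply Finset.mem_union_right
    exact Finset.mem_biUnion.mpr ⟨j, hj, List.mem_toFinset.mpr hx⟩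
  rwa [CF_stab p c i 1] at h1

theorem mu_lt (p : List String) (c : List (List (String × List Int)))
    {i j : Int} (hnotin : i ∉ CF p c (fuelA c) j) (hj : j ∈ kids0 p c i) :
    (CF p c (fuelA c) j).card < (CF p c (fuelA c) i).card := by
  have hm1 : 1 ≤ fuelA c := by simp only [fuelA]; omega
  have hjmem : j ∈ CF p c (fuelA c) i := CF_mono p c hm1 i (kids_mem_CF p c 0 hj)
  have hsub : CF p c (fuelA c) j ⊆ CF p c (fuelA c) i :=
    CF_least p c (fun j' hj' => CF_closed p c hj') hjmem (fuelA c)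
  apply Finset.card_lt_card
  rw [Finset.ssubset_iff_of_subset hsub]
  exact ⟨i, mem_CF_self p c (fuelA c) i, hnotin⟩

theorem card_CF_pos (p : List String) (c : List (List (String × List Int))) (m : Nat) (i : Int) :
    1 ≤ (CF p c m i).card :=
  Finset.card_pos.mpr ⟨i, mem_CF_self p c m i⟩

-- ===== A-side lemmas =====
def SA (w p : List String) (c : List (List (String × List Int))) (f : Nat) (i : Int) : String :=
  (goA w p c f i []).2

theorem foldl_pair_snd (F : (List Int × String) → Int → List Int) (g : Int → String) :
    ∀ (att : List Int) (s : List Int) (pre : String),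
      (att.foldl (fun acc j => (F acc j, acc.2 ++ g j)) (s, pre)).2 = pre ++ joinAll (att.map g) := by
  intro att
  induction att with
  | nil => intro s pre; simp [joinAll]
  | cons x xs ih =>
    intro s pre
    simp only [List.foldl_cons, List.map_cons]
    rw [ih]
    simp [joinAll, String.append_assoc]

theorem goA_snd_ml (w p : List String) (c : List (List (String × List Int))) :
    ∀ (f : Nat) (i : Int) (ml : List Int), (goA w p c f i ml).2 = SA w p c f i := by
  intro f
  induction f with
  | zero => intro i ml; rfl
  | succ f ih =>
    intro i ml
    show (goA w p c (f+1) i ml).2 = (goA w p c (f+1) i []).2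
    simp only [goA]
    rcases hA : ((PySem.List.pyGet? c i).getD []).lookup "ATT" with _ | att <;>
      by_cases hv : ((PySem.List.pyGet? p i).getD "" == "v") = true <;>
        rcases hV : ((PySem.List.pyGet? c i).getD []).lookup "VOB" with _ | lv <;>
          rcases hS : ((PySem.List.pyGet? c i).getD []).lookup "SBV" with _ | ls <;>
            simp only [hA, hv, hV, hS, if_true, if_false, Bool.false_eq_true, ite_false, ite_true]
    all_goals try simp only [ih]
    all_goals try simp only [foldl_pair_snd]
    all_goals rfl

theorem SA_succ (w p : List String) (c : List (List (String × List Int))) (f : Nat) (i : Int) :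
    SA w p c (f+1) i =
      joinAll ((sbvOf p c i).map (SA w p c f)) ++ joinAll ((attOf c i).map (SA w p c f))
        ++ (PySem.List.pyGet? w i).getD "" ++ joinAll ((vobOf p c i).map (SA w p c f)) := by
  show (goA w p c (f+1) i []).2 = _
  simp only [goA, attOf, vobOf, sbvOf]
  rcases hA : ((PySem.List.pyGet? c i).getD []).lookup "ATT" with _ | att <;>
    by_cases hv : ((PySem.List.pyGet? p i).getD "" == "v") = true <;>
      rcases hV : ((PySem.List.pyGet? c i).getD []).lookup "VOB" with _ | lv <;>
        rcases hS : ((PySem.List.pyGet? c i).getD []).lookup "SBV" with _ | ls <;>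
          simp only [hA, hv, hV, hS, if_true, if_false, Bool.false_eq_true, ite_false, ite_true,
            Option.getD_some, Option.getD_none]
  all_goals try simp only [goA_snd_ml]
  all_goals try simp only [foldl_pair_snd]
  all_goals try simp [joinAll, String.append_assoc, String.append_empty, String.empty_append]

theorem SA_stab (w p : List String) (c : List (List (String × List Int))) (RS : Finset Int)
    (HR : ∀ i ∈ RS, ∀ j ∈ kids0 p c i, j ∈ RS)
    (Hacyc : ∀ i ∈ RS, ∀ j ∈ kids0 p c i, i ∉ CF p c (fuelA c) j) :
    ∀ (N : Nat) (i : Int), i ∈ RS → (CF p c (fuelA c) i).card ≤ N →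
      ∀ f g : Nat, (CF p c (fuelA c) i).card ≤ f → (CF p c (fuelA c) i).card ≤ g →
        SA w p c f i = SA w p c g i := by
  intro N
  induction N with
  | zero =>
    intro i _ hcard
    have := card_CF_pos p c (fuelA c) i
    omega
  | succ N ih =>
    intro i hok hcard f g hf hg
    have hpos := card_CF_pos p c (fuelA c) i
    obtain ⟨f', rfl⟩ : ∃ f', f = f'+1 := ⟨f-1, by omega⟩
    obtain ⟨g', rfl⟩ : ∃ g', g = g'+1 := ⟨g-1, by omega⟩
    rw [SA_succ, SA_succ]
    have hkid : ∀ j ∈ kids0 p c i, SA w p c f' j = SA w p c g' j := by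
      intro j hj
      have hokj := HR i hok j hj
      have hlt := mu_lt p c (Hacyc i hok j hj) hj
      exact ih j hokj (by omega) f' g' (by omega) (by omega)
    have h1 : (attOf c i).map (SA w p c f') = (attOf c i).map (SA w p c g') :=
      List.map_congr_left (fun j hj => hkid j (by rw [kids0_eq]; simp [hj]))
    have h2 : (vobOf p c i).map (SA w p c f') = (vobOf p c i).map (SA w p c g') :=
      List.map_congr_left (fun j hj => hkid j (by rw [kids0_eq]; simp [hj]))
    have h3 : (sbvOf p c i).map (SA w p c f') = (sbvOf p c i).map (SA w p c g') :=
      List.map_congr_left (fun j hj => hkid j (by rw [kids0_eq]; simp [hj]))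
    rw [h1, h2, h3]

-- ===== B-side lemmas =====
def costB (p : List String) (c : List (List (String × List Int))) (i : Int) : Nat :=
  costF p c (fuelA c + 1) i

theorem costF_stab (p : List String) (c : List (List (String × List Int))) (RS : Finset Int)
    (HR : ∀ i ∈ RS, ∀ j ∈ kids0 p c i, j ∈ RS)
    (Hacyc : ∀ i ∈ RS, ∀ j ∈ kids0 p c i, i ∉ CF p c (fuelA c) j) :
    ∀ (N : Nat) (i : Int), i ∈ RS → (CF p c (fuelA c) i).card ≤ N →
      ∀ f g : Nat, (CF p c (fuelA c) i).card ≤ f → (CF p c (fuelA c) i).card ≤ g →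
        costF p c f i = costF p c g i := by
  intro N
  induction N with
  | zero =>
    intro i _ hcard
    have := card_CF_pos p c (fuelA c) i
    omega
  | succ N ih =>
    intro i hok hcard f g hf hg
    have hpos := card_CF_pos p c (fuelA c) i
    obtain ⟨f', rfl⟩ : ∃ f', f = f'+1 := ⟨f-1, by omega⟩
    obtain ⟨g', rfl⟩ : ∃ g', g = g'+1 := ⟨g-1, by omega⟩
    simp only [costF]
    have hkid : (kids0 p c i).map (costF p c f') = (kids0 p c i).map (costF p c g') := by
      apply List.map_congr_left
      intro j hj
      have hokj := HR i hok j hj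
      have hlt := mu_lt p c (Hacyc i hok j hj) hj
      exact ih j hokj (by omega) f' g' (by omega) (by omega)
    rw [hkid]

theorem cost_unfold (p : List String) (c : List (List (String × List Int))) (RS : Finset Int)
    (HR : ∀ i ∈ RS, ∀ j ∈ kids0 p c i, j ∈ RS)
    (Hacyc : ∀ i ∈ RS, ∀ j ∈ kids0 p c i, i ∉ CF p c (fuelA c) j)
    {i : Int} (hi : i ∈ RS) :
    costB p c i = 2 + ((kids0 p c i).map (costB p c)).sum := by
  have hKm := CF_card_le p c (fuelA c) i
  have hpos := card_CF_pos p c (fuelA c) i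
  have h1 : costB p c i = costF p c ((CF p c (fuelA c) i).card) i :=
    costF_stab p c RS HR Hacyc ((CF p c (fuelA c) i).card) i hi le_rfl (fuelA c + 1) _ (by omega) le_rfl
  obtain ⟨K', hK'⟩ : ∃ K', (CF p c (fuelA c) i).card = K'+1 := ⟨(CF p c (fuelA c) i).card - 1, by omega⟩
  rw [h1, hK']
  simp only [costF]
  have hmap : (kids0 p c i).map (costF p c K') = (kids0 p c i).map (costB p c) := by
    apply List.map_congr_left
    intro j hj
    have hokj := HR i hi j hj
    have hlt := mu_lt p c (Hacyc i hi j hj) hj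
    have hjm := CF_card_le p c (fuelA c) j
    exact costF_stab p c RS HR Hacyc ((CF p c (fuelA c) j).card) j hokj le_rfl K' (fuelA c + 1)
      (by omega) (by omega)
  rw [hmap]

theorem runB_nil (w p : List String) (c : List (List (String × List Int))) (f : Nat) (out : List String) :
    runB w p c f [] out = out := by cases f <;> rfl

def fragB (w p : List String) (c : List (List (String × List Int))) (i : Int) : List String :=
  runB w p c (costB p c i) [(false, i)] []

theorem runB_visits (w p : List String) (c : List (List (String × List Int))) (RS : Finset Int) (N : Nat)
    (IH : ∀ i : Int, i ∈ RS → (CF p c (fuelA c) i).card ≤ N →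
      ∀ (f : Nat) (st : List (Bool × Int)) (out : List String),
        runB w p c (costB p c i + f) ((false, i) :: st) out = runB w p c f st (out ++ fragB w p c i)) :
    ∀ (l : List Int), (∀ j ∈ l, j ∈ RS ∧ (CF p c (fuelA c) j).card ≤ N) →
      ∀ (f : Nat) (st : List (Bool × Int)) (out : List String),
        runB w p c ((l.map (costB p c)).sum + f) (l.map (fun j => ((false, j) : Bool × Int)) ++ st) out
          = runB w p c f st (out ++ l.flatMap (fragB w p c)) := by
  intro l
  induction l with
  | nil => intro _ f st out; simp
  | cons x xs ih =>
    intro hl f st out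
    simp only [List.map_cons, List.sum_cons, List.cons_append]
    rw [show costB p c x + (xs.map (costB p c)).sum + f
          = costB p c x + ((xs.map (costB p c)).sum + f) by omega]
    rw [IH x (hl x (by simp)).1 (hl x (by simp)).2]
    rw [ih (fun j hj => hl j (by simp [hj]))]
    simp [List.append_assoc]

theorem runB_key (w p : List String) (c : List (List (String × List Int))) (RS : Finset Int)
    (HR : ∀ i ∈ RS, ∀ j ∈ kids0 p c i, j ∈ RS)
    (Hacyc : ∀ i ∈ RS, ∀ j ∈ kids0 p c i, i ∉ CF p c (fuelA c) j) :
    ∀ (N : Nat) (i : Int), i ∈ RS → (CF p c (fuelA c) i).card ≤ N →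
      ∀ (f : Nat) (st : List (Bool × Int)) (out : List String),
        runB w p c (costB p c i + f) ((false, i) :: st) out
          = runB w p c f st (out ++ ((sbvOf p c i ++ attOf c i).flatMap (fragB w p c)
              ++ [(PySem.List.pyGet? w i).getD ""] ++ (vobOf p c i).flatMap (fragB w p c))) := by
  intro N
  induction N with
  | zero =>
    intro i _ hcard
    have := card_CF_pos p c (fuelA c) i
    omega
  | succ N ihN =>
    intro i hok hcard f st out
    have ihFrag : ∀ j : Int, j ∈ RS → (CF p c (fuelA c) j).card ≤ N →
        ∀ (f' : Nat) (st' : List (Bool × Int)) (out' : List String),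
          runB w p c (costB p c j + f') ((false, j) :: st') out'
            = runB w p c f' st' (out' ++ fragB w p c j) := by
      intro j hokj hcardj f' st' out'
      have hd := ihN j hokj hcardj 0 [] []
      rw [Nat.add_zero] at hd
      have hfragj : fragB w p c j = (sbvOf p c j ++ attOf c j).flatMap (fragB w p c)
          ++ [(PySem.List.pyGet? w j).getD ""] ++ (vobOf p c j).flatMap (fragB w p c) := by
        rw [fragB, hd, runB_nil]
        simp
      rw [ihN j hokj hcardj f' st' out', ← hfragj]
    have hkidok : ∀ j ∈ kids0 p c i, j ∈ RS ∧ (CF p c (fuelA c) j).card ≤ N := by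
      intro j hj
      exact ⟨HR i hok j hj, by have := mu_lt p c (Hacyc i hok j hj) hj; omega⟩
    have hsum : ((kids0 p c i).map (costB p c)).sum
        = ((sbvOf p c i ++ attOf c i).map (costB p c)).sum + ((vobOf p c i).map (costB p c)).sum := by
      rw [kids0_eq]
      simp only [List.map_append, List.sum_append]
      omega
    rw [cost_unfold p c RS HR Hacyc hok, hsum]
    rw [show 2 + (((sbvOf p c i ++ attOf c i).map (costB p c)).sum
          + ((vobOf p c i).map (costB p c)).sum) + f
        = (((sbvOf p c i ++ attOf c i).map (costB p c)).sum
          + ((((vobOf p c i).map (costB p c)).sum + f) + 1)) + 1 by omega]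
    rw [show runB w p c ((((sbvOf p c i ++ attOf c i).map (costB p c)).sum
          + ((((vobOf p c i).map (costB p c)).sum + f) + 1)) + 1) ((false, i) :: st) out
        = runB w p c (((sbvOf p c i ++ attOf c i).map (costB p c)).sum
          + ((((vobOf p c i).map (costB p c)).sum + f) + 1)) (itemsB p c i ++ st) out from rfl]
    rw [itemsB_eq]
    rw [show ((sbvOf p c i ++ attOf c i).map (fun j => ((false, j) : Bool × Int))
          ++ [(true, i)] ++ (vobOf p c i).map (fun j => ((false, j) : Bool × Int))) ++ st
        = (sbvOf p c i ++ attOf c i).map (fun j => ((false, j) : Bool × Int))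
          ++ ((true, i) :: ((vobOf p c i).map (fun j => ((false, j) : Bool × Int)) ++ st)) by
      simp [List.append_assoc]]
    rw [runB_visits w p c RS N ihFrag (sbvOf p c i ++ attOf c i)
      (fun j hj => hkidok j (by rw [kids0_eq]; rcases List.mem_append.mp hj with h | h <;> simp [h]))]
    rw [show runB w p c (((((vobOf p c i).map (costB p c)).sum + f) + 1))
          ((true, i) :: ((vobOf p c i).map (fun j => ((false, j) : Bool × Int)) ++ st))
          (out ++ (sbvOf p c i ++ attOf c i).flatMap (fragB w p c))
        = runB w p c (((vobOf p c i).map (costB p c)).sum + f)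
          ((vobOf p c i).map (fun j => ((false, j) : Bool × Int)) ++ st)
          ((out ++ (sbvOf p c i ++ attOf c i).flatMap (fragB w p c))
            ++ [(PySem.List.pyGet? w i).getD ""]) from rfl]
    rw [runB_visits w p c RS N ihFrag (vobOf p c i)
      (fun j hj => hkidok j (by rw [kids0_eq]; simp [hj]))]
    simp [List.append_assoc]

theorem fragB_decomp (w p : List String) (c : List (List (String × List Int))) (RS : Finset Int)
    (HR : ∀ i ∈ RS, ∀ j ∈ kids0 p c i, j ∈ RS)
    (Hacyc : ∀ i ∈ RS, ∀ j ∈ kids0 p c i, i ∉ CF p c (fuelA c) j)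
    {i : Int} (hok : i ∈ RS) :
    fragB w p c i = (sbvOf p c i ++ attOf c i).flatMap (fragB w p c)
      ++ [(PySem.List.pyGet? w i).getD ""] ++ (vobOf p c i).flatMap (fragB w p c) := by
  have hd := runB_key w p c RS HR Hacyc ((CF p c (fuelA c) i).card) i hok le_rfl 0 [] []
  rw [Nat.add_zero] at hd
  rw [fragB, hd, runB_nil]
  simp

theorem joinAll_flatMap (g : Int → List String) (l : List Int) :
    joinAll (l.flatMap g) = joinAll (l.map (fun j => joinAll (g j))) := by
  induction l with
  | nil => rfl
  | cons x xs ih => simp [List.flatMap_cons, joinAll_append, joinAll, ih]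

theorem joinAll_fragB (w p : List String) (c : List (List (String × List Int))) (RS : Finset Int)
    (HR : ∀ i ∈ RS, ∀ j ∈ kids0 p c i, j ∈ RS)
    (Hacyc : ∀ i ∈ RS, ∀ j ∈ kids0 p c i, i ∉ CF p c (fuelA c) j) :
    ∀ (N : Nat) (i : Int), i ∈ RS → (CF p c (fuelA c) i).card ≤ N →
      joinAll (fragB w p c i) = SA w p c ((CF p c (fuelA c) i).card) i := by
  intro N
  induction N with
  | zero =>
    intro i _ hcard
    have := card_CF_pos p c (fuelA c) i
    omega
  | succ N ih =>
    intro i hok hcard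
    have hpos := card_CF_pos p c (fuelA c) i
    obtain ⟨K', hK'⟩ : ∃ K', (CF p c (fuelA c) i).card = K'+1 := ⟨(CF p c (fuelA c) i).card - 1, by omega⟩
    have hfrag := fragB_decomp w p c RS HR Hacyc hok
    have hkid : ∀ j ∈ kids0 p c i, joinAll (fragB w p c j) = SA w p c K' j := by
      intro j hj
      have hokj := HR i hok j hj
      have hlt := mu_lt p c (Hacyc i hok j hj) hj
      have h1 := ih j hokj (by omega)
      rw [h1]
      exact SA_stab w p c RS HR Hacyc ((CF p c (fuelA c) j).card) j hokj le_rfl _ K' le_rfl (by omega)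
    rw [hK', SA_succ, hfrag]
    rw [joinAll_append, joinAll_append, joinAll_flatMap, joinAll_flatMap]
    rw [List.map_congr_left (fun j hj => hkid j (by rw [kids0_eq]; rcases List.mem_append.mp hj with h | h <;> simp [h]))]
    rw [List.map_congr_left (fun j hj => hkid j (by rw [kids0_eq]; simp [hj]))]
    rw [List.map_append, joinAll_append]
    simp [joinAll, String.append_assoc, String.append_empty]

-- ===== final assembly =====
theorem complete_e_spec : Claim_equal_complete_e := by
  unfold Claim_equal_complete_e
  intro w p c wi ml _hDom hPre
  obtain ⟨_hgood, hacyc⟩ := hPre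
  unfold Spec_complete_e
  have HR : ∀ i ∈ CF p c (fuelA c) wi, ∀ j ∈ kids0 p c i, j ∈ CF p c (fuelA c) wi :=
    fun i hi j hj => CF_closed p c hi j hj
  have hwi : wi ∈ CF p c (fuelA c) wi := mem_CF_self p c (fuelA c) wi
  have hKm : (CF p c (fuelA c) wi).card ≤ fuelA c := CF_card_le p c (fuelA c) wi
  -- A side
  have hAside : complete_e w p c wi ml = SA w p c ((CF p c (fuelA c) wi).card) wi := by
    unfold complete_e
    rw [goA_snd_ml]
    exact SA_stab w p c (CF p c (fuelA c) wi) HR hacyc ((CF p c (fuelA c) wi).card) wi hwi le_rfl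
      (fuelA c) ((CF p c (fuelA c) wi).card) (by omega) le_rfl
  -- B side
  have hBside : complete_e_alt w p c wi ml = SA w p c ((CF p c (fuelA c) wi).card) wi := by
    unfold complete_e_alt
    show PySem.Str.join "" (runB w p c (costF p c (fuelA c + 1) wi) [(false, wi)] []) = _
    rw [show runB w p c (costF p c (fuelA c + 1) wi) [(false, wi)] [] = fragB w p c wi from rfl]
    rw [strJoin_eq]
    exact joinAll_fragB w p c (CF p c (fuelA c) wi) HR hacyc ((CF p c (fuelA c) wi).card) wi hwi le_rfl
  rw [hAside, hBside]
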